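-- pv_equiv track=rewrite | github.com/sdubee10/Problem-Solving | BaekJoon/11403. 경로 찾기.py | BFS
-- ===== SOURCE A (Python) =====
-- def BFS(i, graph, n):
--     visit = [0] * n
--     q = [i]
--     while q:
--         index = q.pop(0)
--         for i, v in enumerate(graph[index]):
--             if visit[i] == 0 and v == 1:
--                 visit[i] = 1
--                 q.append(i)
--     return visit
-- ===== SOURCE B (Python) =====
-- def BFS(i, graph, n):
--     visit = [0] * n
--     for v, x in enumerate(graph[i]):
--         if x == 1:
--             visit[v] = 1
--     changed = True
--     while changed:
--         changed = False
--         for u in range(n):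
--             if visit[u] == 1:
--                 for v in range(n):
--                     if graph[u][v] == 1 and visit[v] == 0:
--                         visit[v] = 1
--                         changed = True
--     return visit
-- ===== Notes on version B (the rewrite author's own statement) =====
-- stated objective: alternative
-- what changed: Replaced the queue-based BFS (pop(0) worklist) by a round-based fixpoint saturation: seed visit with the successors of i, then repeatedly rescan all marked rows until a full pass makes no change.
-- outside the precondition, e.g. on BFS(0, [[1, 1], [0, 0]], 3): A returns [1, 1, 0], B raises IndexError; on BFS(0, [[1], [1]], 2): A returns [1, 0], B raises IndexError
import Mathlib
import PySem

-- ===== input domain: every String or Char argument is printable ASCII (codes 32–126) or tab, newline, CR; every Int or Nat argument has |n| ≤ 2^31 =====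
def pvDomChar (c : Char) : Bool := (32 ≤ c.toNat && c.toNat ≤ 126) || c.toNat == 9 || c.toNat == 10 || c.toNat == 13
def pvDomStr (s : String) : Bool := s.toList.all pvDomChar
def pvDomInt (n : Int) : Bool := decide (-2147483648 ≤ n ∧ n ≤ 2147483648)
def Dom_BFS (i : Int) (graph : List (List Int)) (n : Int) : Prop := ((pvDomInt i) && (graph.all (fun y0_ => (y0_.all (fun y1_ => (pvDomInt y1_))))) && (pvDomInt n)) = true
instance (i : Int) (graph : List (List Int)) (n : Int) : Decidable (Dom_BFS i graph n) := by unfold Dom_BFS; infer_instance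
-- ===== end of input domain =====

-- B replaces the queue-based BFS by a round-based fixpoint saturation (seed with i's successors, rescan marked rows until a pass changes nothing); alternative algorithm, not claimed faster.

-- ===== PORT A =====
-- 'for i, v in enumerate(graph[index]): if visit[i]==0 and v==1: visit[i]=1; q.append(i)'
def pvMarkRow (visit q : List Int) (idx : Int) : List Int → List Int × List Int
  | [] => (visit, q)
  | v :: row =>
    if PySem.List.pyGet? visit idx = some 0 ∧ v = 1 then
      pvMarkRow (PySem.List.pySetD visit idx 1) (q ++ [idx]) (idx + 1) row
    else
      pvMarkRow visit q (idx + 1) row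

-- 'while q: index = q.pop(0); <scan row>' (fuel only makes the loop total; it suffices on Pre_)
def pvBfsLoop (graph : List (List Int)) : Nat → List Int → List Int → List Int
  | 0, visit, _ => visit
  | fuel + 1, visit, q =>
    match q with
    | [] => visit
    | index :: rest =>
      let st := pvMarkRow visit rest 0 ((PySem.List.pyGet? graph index).getD [])
      pvBfsLoop graph fuel st.1 st.2

def BFS (i : Int) (graph : List (List Int)) (n : Int) : List Int :=
  pvBfsLoop graph (n.toNat + 1) (List.replicate n.toNat 0) [i]

-- ===== PORT B =====
-- 'for v, x in enumerate(graph[i]): if x == 1: visit[v] = 1'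
def pvSeedRow (visit : List Int) (idx : Int) : List Int → List Int
  | [] => visit
  | x :: row =>
    if x = 1 then pvSeedRow (PySem.List.pySetD visit idx 1) (idx + 1) row
    else pvSeedRow visit (idx + 1) row

-- 'for v in range(n): if graph[u][v] == 1 and visit[v] == 0: visit[v] = 1; changed = True'
def pvInner (graph : List (List Int)) (n' : Nat) (u : Nat) (st : List Int × Bool) : List Int × Bool :=
  (List.range n').foldl
    (fun st (v : Nat) =>
      if PySem.List.pyGet? ((PySem.List.pyGet? graph (u : Int)).getD []) (v : Int) = some 1 ∧
         PySem.List.pyGet? st.1 (v : Int) = some 0 then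
        (PySem.List.pySetD st.1 (v : Int) 1, true)
      else st) st

-- 'for u in range(n): if visit[u] == 1: <inner>'
def pvPass (graph : List (List Int)) (n' : Nat) (visit : List Int) : List Int × Bool :=
  (List.range n').foldl
    (fun st (u : Nat) => if PySem.List.pyGet? st.1 (u : Int) = some 1 then pvInner graph n' u st else st)
    (visit, false)

-- 'changed = True; while changed: changed = False; <pass>' (fuel only makes the loop total; it suffices on Pre_)
def pvSaturate (graph : List (List Int)) (n' : Nat) : Nat → List Int → List Int
  | 0, visit => visit
  | fuel + 1, visit =>
    match pvPass graph n' visit with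
    | (visit', changed) => if changed then pvSaturate graph n' fuel visit' else visit'

def BFS_alt (i : Int) (graph : List (List Int)) (n : Int) : List Int :=
  pvSaturate graph n.toNat (n.toNat + 1)
    (pvSeedRow (List.replicate n.toNat 0) 0 ((PySem.List.pyGet? graph i).getD []))

-- ===== PRECONDITION & SPEC =====
-- Pre_ covers the natural adjacency-matrix domain (a square n×n matrix with 0 ≤ i < n) and, beyond
-- it, every input whose start row graph[i] exists, fits in visit, and contains no 1 (nothing is
-- ever marked, so no other row is touched). Outside Pre_ A raises IndexError on most inputs; where
-- A still returns, it does so via accidental shape slack of a ragged matrix whose reachable rows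
-- are shorter than n, corners on which the natural B raises.
def pvSquare (i : Int) (graph : List (List Int)) (n : Int) : Prop :=
  0 ≤ i ∧ i < n ∧ (graph.length : Int) = n ∧ ∀ r ∈ graph, (r.length : Int) = n

def pvFlat (i : Int) (graph : List (List Int)) (n : Int) : Prop :=
  (PySem.List.pyGet? graph i).isSome = true ∧
  ((PySem.List.pyGet? graph i).getD []).length ≤ n.toNat ∧
  (1 : Int) ∉ (PySem.List.pyGet? graph i).getD []

def Pre_BFS (i : Int) (graph : List (List Int)) (n : Int) : Prop :=
  pvSquare i graph n ∨ pvFlat i graph n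

instance (i : Int) (graph : List (List Int)) (n : Int) : Decidable (Pre_BFS i graph n) := by
  unfold Pre_BFS pvSquare pvFlat; infer_instance

def pvWitness_BFS : Int × List (List Int) × Int := (0, [[0, 1, 0], [0, 0, 1], [0, 0, 0]], 3)

def Spec_BFS (i : Int) (graph : List (List Int)) (n : Int) (out : List Int) : Prop :=
  out = BFS_alt i graph n
instance (i : Int) (graph : List (List Int)) (n : Int) (out : List Int) :
    Decidable (Spec_BFS i graph n out) := by unfold Spec_BFS; infer_instance

-- ===== CLAIM (what is proved, stated in full; the proofs are below) =====
def Claim_equal_BFS : Prop :=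
  ∀ (i : Int) (graph : List (List Int)) (n : Int),
    Dom_BFS i graph n → Pre_BFS i graph n → Spec_BFS i graph n (BFS i graph n)

-- ===== LEMMAS AND PROOFS =====

-- 'j is marked in visit'
def pvMk (visit : List Int) (j : Nat) : Prop := visit[j]? = some 1

-- 'there is an edge u -> v'
def pvEd (g : List (List Int)) (u v : Nat) : Prop := ∃ r, g[u]? = some r ∧ r[v]? = some (1 : Int)

-- 'v is reachable from k by at least one edge'
inductive pvRch (g : List (List Int)) (k : Nat) : Nat → Prop
  | base (v : Nat) : pvEd g k v → pvRch g k v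
  | step (u v : Nat) : pvRch g k u → pvEd g u v → pvRch g k v

-- entries of visit are 0 or 1
def pv01 (visit : List Int) : Prop :=
  ∀ j, j < visit.length → visit[j]? = some 0 ∨ visit[j]? = some 1

-- A's result and B's result are both characterised by reachability
def pvChar (g : List (List Int)) (k N : Nat) (res : List Int) : Prop :=
  res.length = N ∧
  ∀ j, j < N → (res[j]? = some 1 ∧ pvRch g k j) ∨ (res[j]? = some 0 ∧ ¬ pvRch g k j)

lemma pvMk_lt {visit : List Int} {j : Nat} (h : pvMk visit j) : j < visit.length := by
  unfold pvMk at h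
  exact (List.getElem?_eq_some_iff.mp h).1

lemma pvMk_set_mono {visit : List Int} {j s : Nat} (h : pvMk visit j) :
    pvMk (visit.set s 1) j := by
  unfold pvMk at h ⊢
  by_cases e : s = j
  · subst e
    have hl := (List.getElem?_eq_some_iff.mp h).1
    simp [List.getElem?_set, hl]
  · simpa [List.getElem?_set, e] using h

lemma pvCount_set {xs : List Int} {m : Nat} (h : xs[m]? = some 0) :
    (xs.set m 1).count 0 + 1 = xs.count 0 := by
  induction xs generalizing m with
  | nil => simp at h
  | cons x xs ih =>
    cases m with
    | zero =>
      simp only [List.getElem?_cons_zero, Option.some.injEq] at h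
      subst h
      simp [List.count_cons]
    | succ m =>
      simp only [List.getElem?_cons_succ] at h
      have := ih h
      simp only [List.set_cons_succ, List.count_cons]
      omega

lemma pv01_set {visit : List Int} {s : Nat} (h : pv01 visit) : pv01 (visit.set s 1) := by
  intro j hj
  rw [List.length_set] at hj
  by_cases e : s = j
  · subst e
    right
    simp [List.getElem?_set, hj]
  · rw [List.getElem?_set_ne e]
    exact h j hj

lemma pvEd_lt {g : List (List Int)} {N u v : Nat} (hrows : ∀ r ∈ g, r.length = N)
    (h : pvEd g u v) : u < g.length ∧ v < N := by
  obtain ⟨r, hr, hv⟩ := h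
  refine ⟨(List.getElem?_eq_some_iff.mp hr).1, ?_⟩
  have hvr := (List.getElem?_eq_some_iff.mp hv).1
  have := hrows r (List.mem_of_getElem? hr)
  omega

lemma pvEd_iff_row {g : List (List Int)} {u v : Nat} {row : List Int}
    (h : g[u]? = some row) : pvEd g u v ↔ row[v]? = some 1 := by
  constructor
  · rintro ⟨r, hr, hv⟩
    rw [h] at hr
    cases hr
    exact hv
  · intro hv
    exact ⟨row, h, hv⟩

-- ---- A side: the row scan, Nat-indexed form ----
def pvMarkRowN (visit q : List Int) (s : Nat) : List Int → List Int × List Int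
  | [] => (visit, q)
  | v :: row =>
    if visit[s]? = some 0 ∧ v = 1 then
      pvMarkRowN (visit.set s 1) (q ++ [(s : Int)]) (s + 1) row
    else pvMarkRowN visit q (s + 1) row

lemma pvMarkRow_eq_N (row : List Int) : ∀ (visit q : List Int) (s : Nat),
    pvMarkRow visit q (s : Int) row = pvMarkRowN visit q s row := by
  induction row with
  | nil => intro visit q s; simp [pvMarkRow, pvMarkRowN]
  | cons v row ih =>
    intro visit q s
    simp only [pvMarkRow, pvMarkRowN, PySem.List.pyGet?_natCast, PySem.List.pySetD_natCast]
    rw [show ((s : Int) + 1) = ((s + 1 : Nat) : Int) by push_cast; ring]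
    split_ifs with h
    · exact ih _ _ _
    · exact ih _ _ _

lemma pvMk_set_cases {visit : List Int} {j s : Nat} (h : pvMk (visit.set s 1) j) :
    pvMk visit j ∨ j = s := by
  by_cases e : s = j
  · right; omega
  · left; unfold pvMk at h ⊢; rwa [List.getElem?_set_ne e] at h

lemma pvMarkRowN_len (row : List Int) : ∀ (visit q : List Int) (s : Nat),
    (pvMarkRowN visit q s row).1.length = visit.length := by
  induction row with
  | nil => intro visit q s; simp [pvMarkRowN]
  | cons v row ih =>
    intro visit q s
    simp only [pvMarkRowN]
    split_ifs with h
    · rw [ih]; exact List.length_set ..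
    · exact ih _ _ _

lemma pvMarkRowN_01 (row : List Int) : ∀ (visit q : List Int) (s : Nat), pv01 visit →
    pv01 (pvMarkRowN visit q s row).1 := by
  induction row with
  | nil => intro visit q s h; simpa [pvMarkRowN] using h
  | cons v row ih =>
    intro visit q s h
    simp only [pvMarkRowN]
    split_ifs with hc
    · exact ih _ _ _ (pv01_set h)
    · exact ih _ _ _ h

lemma pvMarkRowN_mono (row : List Int) : ∀ (visit q : List Int) (s j : Nat),
    pvMk visit j → pvMk (pvMarkRowN visit q s row).1 j := by
  induction row with
  | nil => intro visit q s j h; simpa [pvMarkRowN] using h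
  | cons v row ih =>
    intro visit q s j h
    simp only [pvMarkRowN]
    split_ifs with hc
    · exact ih _ _ _ _ (pvMk_set_mono h)
    · exact ih _ _ _ _ h

lemma pvMarkRowN_new (row : List Int) : ∀ (visit q : List Int) (s j : Nat),
    pvMk (pvMarkRowN visit q s row).1 j →
    pvMk visit j ∨ ∃ d, row[d]? = some 1 ∧ j = s + d := by
  induction row with
  | nil => intro visit q s j h; left; simpa [pvMarkRowN] using h
  | cons v row ih =>
    intro visit q s j h
    simp only [pvMarkRowN] at h
    split_ifs at h with hc
    · rcases ih _ _ _ _ h with hm | ⟨d, hd, hjd⟩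
      · rcases pvMk_set_cases hm with hm' | rfl
        · exact Or.inl hm'
        · exact Or.inr ⟨0, by simp [hc.2], by omega⟩
      · exact Or.inr ⟨d + 1, by simpa using hd, by omega⟩
    · rcases ih _ _ _ _ h with hm | ⟨d, hd, hjd⟩
      · exact Or.inl hm
      · exact Or.inr ⟨d + 1, by simpa using hd, by omega⟩

lemma pvMarkRowN_cover (row : List Int) : ∀ (visit q : List Int) (s d : Nat),
    pv01 visit → row[d]? = some (1 : Int) → s + d < visit.length →
    pvMk (pvMarkRowN visit q s row).1 (s + d) := by
  induction row with
  | nil => intro visit q s d _ hd _; simp at hd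
  | cons v row ih =>
    intro visit q s d h01 hd hlt
    cases d with
    | zero =>
      simp only [List.getElem?_cons_zero, Option.some.injEq] at hd
      subst hd
      simp only [pvMarkRowN]
      rw [Nat.add_zero] at hlt ⊢
      rcases h01 s hlt with h0 | h1
      · split_ifs with hc
        · apply pvMarkRowN_mono
          unfold pvMk
          simp [List.getElem?_set, hlt]
        · exact absurd h0 (by simpa using hc)
      · split_ifs with hc
        · apply pvMarkRowN_mono
          unfold pvMk
          simp [List.getElem?_set, hlt]
        · exact pvMarkRowN_mono _ _ _ _ _ h1
    | succ d =>
      simp only [List.getElem?_cons_succ] at hd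
      simp only [pvMarkRowN]
      have hre : s + (d + 1) = (s + 1) + d := by omega
      rw [hre]
      split_ifs with hc
      · exact ih _ _ _ _ (pv01_set h01) hd (by rw [List.length_set]; omega)
      · exact ih _ _ _ _ h01 hd (by omega)

lemma pvMarkRowN_qsup (row : List Int) : ∀ (visit q : List Int) (s : Nat) (x : Int),
    x ∈ q → x ∈ (pvMarkRowN visit q s row).2 := by
  induction row with
  | nil => intro visit q s x h; simpa [pvMarkRowN] using h
  | cons v row ih =>
    intro visit q s x h
    simp only [pvMarkRowN]
    split_ifs with hc
    · exact ih _ _ _ _ (List.mem_append_left _ h)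
    · exact ih _ _ _ _ h

lemma pvMarkRowN_qnew (row : List Int) : ∀ (visit q : List Int) (s : Nat) (x : Int),
    x ∈ (pvMarkRowN visit q s row).2 →
    x ∈ q ∨ ∃ d, row[d]? = some 1 ∧ x = ((s + d : Nat) : Int) := by
  induction row with
  | nil => intro visit q s x h; left; simpa [pvMarkRowN] using h
  | cons v row ih =>
    intro visit q s x h
    simp only [pvMarkRowN] at h
    split_ifs at h with hc
    · rcases ih _ _ _ _ h with hm | ⟨d, hd, hxd⟩
      · rcases List.mem_append.mp hm with hq | hx
        · exact Or.inl hq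
        · refine Or.inr ⟨0, by simp [hc.2], ?_⟩
          simpa using hx
      · exact Or.inr ⟨d + 1, by simpa using hd, by rw [hxd]; congr 1; omega⟩
    · rcases ih _ _ _ _ h with hm | ⟨d, hd, hxd⟩
      · exact Or.inl hm
      · exact Or.inr ⟨d + 1, by simpa using hd, by rw [hxd]; congr 1; omega⟩

lemma pvMarkRowN_newq (row : List Int) : ∀ (visit q : List Int) (s j : Nat),
    pvMk (pvMarkRowN visit q s row).1 j → ¬ pvMk visit j →
    (j : Int) ∈ (pvMarkRowN visit q s row).2 := by
  induction row with
  | nil => intro visit q s j h hn; exact absurd (by simpa [pvMarkRowN] using h) hn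
  | cons v row ih =>
    intro visit q s j h hn
    simp only [pvMarkRowN] at h ⊢
    split_ifs at h ⊢ with hc
    · by_cases hm : pvMk (visit.set s 1) j
      · rcases pvMk_set_cases hm with hm' | rfl
        · exact absurd hm' hn
        · exact pvMarkRowN_qsup _ _ _ _ _ (List.mem_append_right _ (by simp))
      · exact ih _ _ _ _ h hm
    · exact ih _ _ _ _ h hn

lemma pvMarkRowN_count (row : List Int) : ∀ (visit q : List Int) (s : Nat),
    (pvMarkRowN visit q s row).1.count 0 + (pvMarkRowN visit q s row).2.length ≤
      visit.count 0 + q.length := by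
  induction row with
  | nil => intro visit q s; simp [pvMarkRowN]
  | cons v row ih =>
    intro visit q s
    simp only [pvMarkRowN]
    split_ifs with hc
    · have h1 := ih (visit.set s 1) (q ++ [(s : Int)]) (s + 1)
      have h2 := pvCount_set (m := s) hc.1
      simp only [List.length_append, List.length_cons, List.length_nil] at h1
      omega
    · exact ih _ _ _

-- A's loop invariant
def pvInvA (g : List (List Int)) (N k : Nat) (visit q : List Int) : Prop :=
  visit.length = N ∧ pv01 visit ∧
  (∀ x ∈ q, ∃ m : Nat, x = (m : Int) ∧ m < N ∧ (m = k ∨ pvRch g k m)) ∧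
  (∀ j, pvMk visit j → pvRch g k j) ∧
  (∀ u, u < N → (pvMk visit u ∨ u = k) →
    ((u : Int) ∈ q ∨ ∀ v, pvEd g u v → pvMk visit v))

lemma pvFinalA {g : List (List Int)} {N k : Nat} {visit : List Int}
    (hgN : g.length = N) (hrows : ∀ r ∈ g, r.length = N) (hk : k < N)
    (hInv : pvInvA g N k visit []) : pvChar g k N visit := by
  obtain ⟨hlen, h01, -, hsound, hclosed⟩ := hInv
  have hcomp : ∀ j, pvRch g k j → pvMk visit j := by
    intro j hr
    induction hr with
    | base v hv =>
      rcases hclosed k hk (Or.inr rfl) with hmem | hcl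
      · simp at hmem
      · exact hcl v hv
    | step u v hru hedge ih =>
      have huN : u < N := hgN ▸ (pvEd_lt hrows hedge).1
      rcases hclosed u huN (Or.inl ih) with hmem | hcl
      · simp at hmem
      · exact hcl v hedge
  refine ⟨hlen, fun j hj => ?_⟩
  rcases h01 j (by omega) with h0 | h1
  · refine Or.inr ⟨h0, fun hr => ?_⟩
    have := hcomp j hr
    unfold pvMk at this
    rw [this] at h0
    simp at h0
  · exact Or.inl ⟨h1, hsound j h1⟩

lemma pvBfsLoop_char {g : List (List Int)} {N k : Nat}
    (hgN : g.length = N) (hrows : ∀ r ∈ g, r.length = N) (hk : k < N) :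
    ∀ (fuel : Nat) (visit q : List Int), pvInvA g N k visit q →
      visit.count 0 + q.length ≤ fuel →
      pvChar g k N (pvBfsLoop g fuel visit q) := by
  intro fuel
  induction fuel with
  | zero =>
    intro visit q hInv hb
    have hq : q = [] := List.eq_nil_of_length_eq_zero (by omega)
    subst hq
    simp only [pvBfsLoop]
    exact pvFinalA hgN hrows hk hInv
  | succ fuel ih =>
    intro visit q hInv hb
    cases q with
    | nil =>
      simp only [pvBfsLoop]
      exact pvFinalA hgN hrows hk hInv
    | cons index rest =>
      obtain ⟨hlen, h01, hq, hsound, hclosed⟩ := hInv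
      obtain ⟨u, hux, huN, husrc⟩ := hq index (by simp)
      subst hux
      have hug : u < g.length := by omega
      obtain ⟨row, hrow⟩ : ∃ row, g[u]? = some row := ⟨_, List.getElem?_eq_getElem hug⟩
      have hrowlen : row.length = N := hrows row (List.mem_of_getElem? hrow)
      have hRfrom : ∀ d, row[d]? = some 1 → pvRch g k d := by
        intro d hd
        rcases husrc with rfl | hru
        · exact pvRch.base d ((pvEd_iff_row hrow).mpr hd)
        · exact pvRch.step u d hru ((pvEd_iff_row hrow).mpr hd)
      simp only [pvBfsLoop]
      have hgu : PySem.List.pyGet? g ((u : Nat) : Int) = some row := by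
        rw [PySem.List.pyGet?_natCast]; exact hrow
      rw [hgu]
      simp only [Option.getD_some]
      have hmr := pvMarkRow_eq_N row visit rest 0
      rw [Nat.cast_zero] at hmr
      rw [hmr]
      apply ih
      · refine ⟨(pvMarkRowN_len row visit rest 0).trans hlen,
          pvMarkRowN_01 row visit rest 0 h01, ?_, ?_, ?_⟩
        · intro x hx
          rcases pvMarkRowN_qnew row visit rest 0 x hx with hxr | ⟨d, hd, hxd⟩
          · exact hq x (List.mem_cons_of_mem _ hxr)
          · have hdN : d < N := by
              have := (List.getElem?_eq_some_iff.mp hd).1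
              omega
            exact ⟨d, by simpa using hxd, hdN, Or.inr (hRfrom d hd)⟩
        · intro j hj
          rcases pvMarkRowN_new row visit rest 0 j hj with hm | ⟨d, hd, hjd⟩
          · exact hsound j hm
          · rw [hjd]
            simpa using hRfrom d hd
        · intro w hwN hw
          by_cases hwold : pvMk visit w ∨ w = k
          · rcases hclosed w hwN hwold with hmem | hcl
            · rcases List.mem_cons.mp hmem with he | hr2
              · have hwu : w = u := by exact_mod_cast he
                subst hwu
                right
                intro v hv
                have hrv := (pvEd_iff_row hrow).mp hv
                have hvN : v < N := by
                  have := (List.getElem?_eq_some_iff.mp hrv).1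
                  omega
                have := pvMarkRowN_cover row visit rest 0 v h01 hrv (by omega)
                simpa using this
              · left
                exact pvMarkRowN_qsup row visit rest 0 _ hr2
            · right
              intro v hv
              exact pvMarkRowN_mono row visit rest 0 v (hcl v hv)
          · push_neg at hwold
            rcases hw with hmk | hk2
            · left
              exact pvMarkRowN_newq row visit rest 0 w hmk hwold.1
            · exact absurd hk2 hwold.2
      · have hcnt := pvMarkRowN_count row visit rest 0
        simp only [List.length_cons] at hb
        omega

lemma pvA_char {i : Int} {g : List (List Int)} {n : Int} (hpre : pvSquare i g n) :
    pvChar g i.toNat g.length (BFS i g n) := by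
  obtain ⟨hi0, hin, hglen, hrows'⟩ := hpre
  have hrows : ∀ r ∈ g, r.length = g.length := fun r hr => by
    have := hrows' r hr
    omega
  have hkN : i.toNat < g.length := by omega
  have hnN : n.toNat = g.length := by omega
  have hik : i = ((i.toNat : Nat) : Int) := by omega
  unfold BFS
  rw [hnN]
  apply pvBfsLoop_char rfl hrows hkN
  · refine ⟨by simp, ?_, ?_, ?_, ?_⟩
    · intro j hj
      simp only [List.length_replicate] at hj
      left
      simp [List.getElem?_replicate, hj]
    · intro x hx
      simp only [List.mem_singleton] at hx
      refine ⟨i.toNat, ?_, hkN, Or.inl rfl⟩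
      rw [hx]
      exact hik
    · intro j hj
      exfalso
      unfold pvMk at hj
      rw [List.getElem?_replicate] at hj
      split_ifs at hj <;> simp at hj
    · intro w hwN hw
      left
      rcases hw with hmk | rfl
      · exfalso
        unfold pvMk at hmk
        rw [List.getElem?_replicate] at hmk
        split_ifs at hmk <;> simp at hmk
      · simp only [List.mem_singleton]
        omega
  · simp [List.count_replicate]

-- ---- B side ----
def pvSeedRowN (visit : List Int) (s : Nat) : List Int → List Int
  | [] => visit
  | x :: row =>
    if x = 1 then pvSeedRowN (visit.set s 1) (s + 1) row
    else pvSeedRowN visit (s + 1) row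

lemma pvSeedRow_eq_N (row : List Int) : ∀ (visit : List Int) (s : Nat),
    pvSeedRow visit (s : Int) row = pvSeedRowN visit s row := by
  induction row with
  | nil => intro visit s; simp [pvSeedRow, pvSeedRowN]
  | cons x row ih =>
    intro visit s
    simp only [pvSeedRow, pvSeedRowN, PySem.List.pySetD_natCast]
    rw [show ((s : Int) + 1) = ((s + 1 : Nat) : Int) by push_cast; ring]
    split_ifs with h
    · exact ih _ _
    · exact ih _ _

lemma pvSeedRowN_len (row : List Int) : ∀ (visit : List Int) (s : Nat),
    (pvSeedRowN visit s row).length = visit.length := by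
  induction row with
  | nil => intro visit s; simp [pvSeedRowN]
  | cons x row ih =>
    intro visit s
    simp only [pvSeedRowN]
    split_ifs with h
    · rw [ih]; exact List.length_set ..
    · exact ih _ _

lemma pvSeedRowN_01 (row : List Int) : ∀ (visit : List Int) (s : Nat), pv01 visit →
    pv01 (pvSeedRowN visit s row) := by
  induction row with
  | nil => intro visit s h; simpa [pvSeedRowN] using h
  | cons x row ih =>
    intro visit s h
    simp only [pvSeedRowN]
    split_ifs with hc
    · exact ih _ _ (pv01_set h)
    · exact ih _ _ h

lemma pvSeedRowN_new (row : List Int) : ∀ (visit : List Int) (s j : Nat),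
    pvMk (pvSeedRowN visit s row) j →
    pvMk visit j ∨ ∃ d, row[d]? = some 1 ∧ j = s + d := by
  induction row with
  | nil => intro visit s j h; left; simpa [pvSeedRowN] using h
  | cons x row ih =>
    intro visit s j h
    simp only [pvSeedRowN] at h
    split_ifs at h with hc
    · rcases ih _ _ _ h with hm | ⟨d, hd, hjd⟩
      · rcases pvMk_set_cases hm with hm' | rfl
        · exact Or.inl hm'
        · exact Or.inr ⟨0, by simp [hc], by omega⟩
      · exact Or.inr ⟨d + 1, by simpa using hd, by omega⟩
    · rcases ih _ _ _ h with hm | ⟨d, hd, hjd⟩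
      · exact Or.inl hm
      · exact Or.inr ⟨d + 1, by simpa using hd, by omega⟩

lemma pvSeedRowN_mono (row : List Int) : ∀ (visit : List Int) (s j : Nat),
    pvMk visit j → pvMk (pvSeedRowN visit s row) j := by
  induction row with
  | nil => intro visit s j h; simpa [pvSeedRowN] using h
  | cons x row ih =>
    intro visit s j h
    simp only [pvSeedRowN]
    split_ifs with hc
    · exact ih _ _ _ (pvMk_set_mono h)
    · exact ih _ _ _ h

lemma pvSeedRowN_cover (row : List Int) : ∀ (visit : List Int) (s d : Nat),
    row[d]? = some (1 : Int) → s + d < visit.length →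
    pvMk (pvSeedRowN visit s row) (s + d) := by
  induction row with
  | nil => intro visit s d hd _; simp at hd
  | cons x row ih =>
    intro visit s d hd hlt
    cases d with
    | zero =>
      simp only [List.getElem?_cons_zero, Option.some.injEq] at hd
      subst hd
      simp only [pvSeedRowN, if_pos rfl]
      rw [Nat.add_zero] at hlt ⊢
      apply pvSeedRowN_mono
      unfold pvMk
      simp [List.getElem?_set, hlt]
    | succ d =>
      simp only [List.getElem?_cons_succ] at hd
      simp only [pvSeedRowN]
      have hre : s + (d + 1) = (s + 1) + d := by omega
      rw [hre]
      split_ifs with hc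
      · exact ih _ _ _ hd (by rw [List.length_set]; omega)
      · exact ih _ _ _ hd (by omega)

-- the loop bodies of pvInner / pvPass, named so fold lemmas can be stated
def pvInnerF (g : List (List Int)) (u : Nat) (st : List Int × Bool) (v : Nat) :
    List Int × Bool :=
  if PySem.List.pyGet? ((PySem.List.pyGet? g (u : Int)).getD []) (v : Int) = some 1 ∧
     PySem.List.pyGet? st.1 (v : Int) = some 0 then
    (PySem.List.pySetD st.1 (v : Int) 1, true)
  else st

def pvPassF (g : List (List Int)) (n' : Nat) (st : List Int × Bool) (u : Nat) :
    List Int × Bool :=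
  if PySem.List.pyGet? st.1 (u : Int) = some 1 then pvInner g n' u st else st

lemma pvInner_eq_fold (g : List (List Int)) (n' u : Nat) (st : List Int × Bool) :
    pvInner g n' u st = (List.range n').foldl (pvInnerF g u) st := by
  unfold pvInner pvInnerF; rfl

lemma pvPass_eq_fold (g : List (List Int)) (n' : Nat) (visit : List Int) :
    pvPass g n' visit = (List.range n').foldl (pvPassF g n') (visit, false) := by
  unfold pvPass pvPassF; rfl

lemma pvPassF_cases (g : List (List Int)) (n' : Nat) (st : List Int × Bool) (u : Nat) :
    (¬ pvMk st.1 u ∧ pvPassF g n' st u = st) ∨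
    (pvMk st.1 u ∧ pvPassF g n' st u = (List.range n').foldl (pvInnerF g u) st) := by
  unfold pvPassF
  simp only [PySem.List.pyGet?_natCast]
  split_ifs with h
  · exact Or.inr ⟨h, pvInner_eq_fold g n' u st⟩
  · exact Or.inl ⟨h, rfl⟩

lemma pvEd_test_iff (g : List (List Int)) (u v : Nat) :
    ((g[u]?.getD [])[v]? = some (1 : Int)) ↔ pvEd g u v := by
  cases hg : g[u]? with
  | none => simp [hg, pvEd]
  | some row =>
    simp only [hg, Option.getD_some]
    exact (pvEd_iff_row hg).symm

lemma pvInnerF_cases (g : List (List Int)) (u : Nat) (st : List Int × Bool) (v : Nat) :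
    (¬ (pvEd g u v ∧ st.1[v]? = some 0) ∧ pvInnerF g u st v = st) ∨
    (pvEd g u v ∧ st.1[v]? = some 0 ∧ pvInnerF g u st v = (st.1.set v 1, true)) := by
  unfold pvInnerF
  simp only [PySem.List.pyGet?_natCast, PySem.List.pySetD_natCast]
  split_ifs with h
  · exact Or.inr ⟨(pvEd_test_iff g u v).mp h.1, h.2, rfl⟩
  · refine Or.inl ⟨?_, rfl⟩
    rintro ⟨he, h0⟩
    exact h ⟨(pvEd_test_iff g u v).mpr he, h0⟩

lemma pvIn_len (g : List (List Int)) (u : Nat) (l : List Nat) :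
    ∀ st : List Int × Bool, (l.foldl (pvInnerF g u) st).1.length = st.1.length := by
  induction l with
  | nil => intro st; simp
  | cons v l ih =>
    intro st
    rw [List.foldl_cons]
    rcases pvInnerF_cases g u st v with ⟨-, he⟩ | ⟨-, -, he⟩
    · rw [he]; exact ih st
    · rw [he]; simpa using ih (st.1.set v 1, true)

lemma pvIn_01 (g : List (List Int)) (u : Nat) (l : List Nat) :
    ∀ st : List Int × Bool, pv01 st.1 → pv01 (l.foldl (pvInnerF g u) st).1 := by
  induction l with
  | nil => intro st h; simpa using h
  | cons v l ih =>
    intro st h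
    rw [List.foldl_cons]
    rcases pvInnerF_cases g u st v with ⟨-, he⟩ | ⟨-, -, he⟩
    · rw [he]; exact ih st h
    · rw [he]; exact ih _ (pv01_set h)

lemma pvIn_mono (g : List (List Int)) (u : Nat) (l : List Nat) :
    ∀ (st : List Int × Bool) (j : Nat), pvMk st.1 j →
      pvMk (l.foldl (pvInnerF g u) st).1 j := by
  induction l with
  | nil => intro st j h; simpa using h
  | cons v l ih =>
    intro st j h
    rw [List.foldl_cons]
    rcases pvInnerF_cases g u st v with ⟨-, he⟩ | ⟨-, -, he⟩
    · rw [he]; exact ih st j h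
    · rw [he]; exact ih _ j (pvMk_set_mono h)

lemma pvIn_new (g : List (List Int)) (u : Nat) (l : List Nat) :
    ∀ (st : List Int × Bool) (j : Nat), pvMk (l.foldl (pvInnerF g u) st).1 j →
      pvMk st.1 j ∨ pvEd g u j := by
  induction l with
  | nil => intro st j h; left; simpa using h
  | cons v l ih =>
    intro st j h
    rw [List.foldl_cons] at h
    rcases pvInnerF_cases g u st v with ⟨-, he⟩ | ⟨hed, -, he⟩
    · rw [he] at h; exact ih st j h
    · rw [he] at h
      rcases ih _ j h with hm | hed'
      · rcases pvMk_set_cases hm with hm' | rfl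
        · exact Or.inl hm'
        · exact Or.inr hed
      · exact Or.inr hed'

lemma pvIn_sticky (g : List (List Int)) (u : Nat) (l : List Nat) :
    ∀ st : List Int × Bool, st.2 = true → (l.foldl (pvInnerF g u) st).2 = true := by
  induction l with
  | nil => intro st h; simpa using h
  | cons v l ih =>
    intro st h
    rw [List.foldl_cons]
    rcases pvInnerF_cases g u st v with ⟨-, he⟩ | ⟨-, -, he⟩
    · rw [he]; exact ih st h
    · rw [he]; exact ih _ rfl

lemma pvIn_nochange (g : List (List Int)) (u : Nat) (l : List Nat) :
    ∀ st : List Int × Bool, (l.foldl (pvInnerF g u) st).2 = false →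
      l.foldl (pvInnerF g u) st = st := by
  induction l with
  | nil => intro st _; simp
  | cons v l ih =>
    intro st h
    rw [List.foldl_cons] at h ⊢
    rcases pvInnerF_cases g u st v with ⟨-, he⟩ | ⟨-, -, he⟩
    · rw [he] at h ⊢; exact ih st h
    · rw [he] at h
      have := pvIn_sticky g u l (st.1.set v 1, true) rfl
      rw [this] at h
      cases h

lemma pvIn_closed (g : List (List Int)) (u : Nat) (l : List Nat) :
    ∀ st : List Int × Bool, (l.foldl (pvInnerF g u) st).2 = false →
      ∀ v ∈ l, pvEd g u v → st.1[v]? ≠ some 0 := by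
  induction l with
  | nil => intro st _ v hv; simp at hv
  | cons v0 l ih =>
    intro st h v hv hedge h0
    rw [List.foldl_cons] at h
    rcases pvInnerF_cases g u st v0 with ⟨hneg, he⟩ | ⟨-, -, he⟩
    · rw [he] at h
      rcases List.mem_cons.mp hv with rfl | hvl
      · exact hneg ⟨hedge, h0⟩
      · exact ih st h v hvl hedge h0
    · rw [he] at h
      have := pvIn_sticky g u l (st.1.set v0 1, true) rfl
      rw [this] at h
      cases h

lemma pvIn_count_le (g : List (List Int)) (u : Nat) (l : List Nat) :
    ∀ st : List Int × Bool, (l.foldl (pvInnerF g u) st).1.count 0 ≤ st.1.count 0 := by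
  induction l with
  | nil => intro st; simp
  | cons v l ih =>
    intro st
    rw [List.foldl_cons]
    rcases pvInnerF_cases g u st v with ⟨-, he⟩ | ⟨-, h0, he⟩
    · rw [he]; exact ih st
    · rw [he]
      have h1 := ih (st.1.set v 1, true)
      have h2 := pvCount_set (m := v) h0
      simp only at h1
      omega

lemma pvIn_count_lt (g : List (List Int)) (u : Nat) (l : List Nat) :
    ∀ st : List Int × Bool, st.2 = false → (l.foldl (pvInnerF g u) st).2 = true →
      (l.foldl (pvInnerF g u) st).1.count 0 < st.1.count 0 := by
  induction l with
  | nil => intro st h1 h2; rw [List.foldl_nil] at h2; rw [h1] at h2; cases h2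
  | cons v l ih =>
    intro st h1 h2
    rw [List.foldl_cons] at h2 ⊢
    rcases pvInnerF_cases g u st v with ⟨-, he⟩ | ⟨-, h0, he⟩
    · rw [he] at h2 ⊢; exact ih st h1 h2
    · rw [he]
      have hle := pvIn_count_le g u l (st.1.set v 1, true)
      have hcs := pvCount_set (m := v) h0
      simp only at hle
      omega

lemma pvPa_len (g : List (List Int)) (n' : Nat) (l : List Nat) :
    ∀ st : List Int × Bool, (l.foldl (pvPassF g n') st).1.length = st.1.length := by
  induction l with
  | nil => intro st; simp
  | cons u l ih =>
    intro st
    rw [List.foldl_cons]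
    rcases pvPassF_cases g n' st u with ⟨-, he⟩ | ⟨-, he⟩
    · rw [he]; exact ih st
    · rw [he, ih]; exact pvIn_len g u (List.range n') st

lemma pvPa_01 (g : List (List Int)) (n' : Nat) (l : List Nat) :
    ∀ st : List Int × Bool, pv01 st.1 → pv01 (l.foldl (pvPassF g n') st).1 := by
  induction l with
  | nil => intro st h; simpa using h
  | cons u l ih =>
    intro st h
    rw [List.foldl_cons]
    rcases pvPassF_cases g n' st u with ⟨-, he⟩ | ⟨-, he⟩
    · rw [he]; exact ih st h
    · rw [he]; exact ih _ (pvIn_01 g u (List.range n') st h)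

lemma pvPa_mono (g : List (List Int)) (n' : Nat) (l : List Nat) :
    ∀ (st : List Int × Bool) (j : Nat), pvMk st.1 j →
      pvMk (l.foldl (pvPassF g n') st).1 j := by
  induction l with
  | nil => intro st j h; simpa using h
  | cons u l ih =>
    intro st j h
    rw [List.foldl_cons]
    rcases pvPassF_cases g n' st u with ⟨-, he⟩ | ⟨-, he⟩
    · rw [he]; exact ih st j h
    · rw [he]; exact ih _ j (pvIn_mono g u (List.range n') st j h)

lemma pvPa_sound (g : List (List Int)) (n' k : Nat) (l : List Nat) :
    ∀ st : List Int × Bool, (∀ j, pvMk st.1 j → pvRch g k j) →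
      ∀ j, pvMk (l.foldl (pvPassF g n') st).1 j → pvRch g k j := by
  induction l with
  | nil => intro st hs j h; exact hs j (by simpa using h)
  | cons u l ih =>
    intro st hs j h
    rw [List.foldl_cons] at h
    rcases pvPassF_cases g n' st u with ⟨-, he⟩ | ⟨hm, he⟩
    · rw [he] at h; exact ih st hs j h
    · rw [he] at h
      have hu : pvRch g k u := hs u hm
      refine ih _ ?_ j h
      intro j' hj'
      rcases pvIn_new g u (List.range n') st j' hj' with hm' | hed
      · exact hs j' hm'
      · exact pvRch.step u j' hu hed

lemma pvPa_sticky (g : List (List Int)) (n' : Nat) (l : List Nat) :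
    ∀ st : List Int × Bool, st.2 = true → (l.foldl (pvPassF g n') st).2 = true := by
  induction l with
  | nil => intro st h; simpa using h
  | cons u l ih =>
    intro st h
    rw [List.foldl_cons]
    rcases pvPassF_cases g n' st u with ⟨-, he⟩ | ⟨-, he⟩
    · rw [he]; exact ih st h
    · rw [he]; exact ih _ (pvIn_sticky g u (List.range n') st h)

lemma pvPa_nochange (g : List (List Int)) (n' : Nat) (l : List Nat) :
    ∀ st : List Int × Bool, (l.foldl (pvPassF g n') st).2 = false →
      l.foldl (pvPassF g n') st = st := by
  induction l with
  | nil => intro st _; simp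
  | cons u l ih =>
    intro st h
    rw [List.foldl_cons] at h ⊢
    rcases pvPassF_cases g n' st u with ⟨-, he⟩ | ⟨-, he⟩
    · rw [he] at h ⊢; exact ih st h
    · rw [he] at h ⊢
      have hst2 : ((List.range n').foldl (pvInnerF g u) st).2 = false := by
        by_contra hne
        have hx : ((List.range n').foldl (pvInnerF g u) st).2 = true :=
          by revert hne; cases ((List.range n').foldl (pvInnerF g _) st).2 <;> simp
        rw [pvPa_sticky g n' l _ hx] at h
        cases h
      rw [pvIn_nochange g u (List.range n') st hst2] at h ⊢
      exact ih st h

lemma pvPa_closed (g : List (List Int)) (n' : Nat) (l : List Nat) :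
    ∀ st : List Int × Bool, (l.foldl (pvPassF g n') st).2 = false →
      ∀ u ∈ l, pvMk st.1 u → ∀ v ∈ List.range n', pvEd g u v → st.1[v]? ≠ some 0 := by
  induction l with
  | nil => intro st _ u hu; simp at hu
  | cons u0 l ih =>
    intro st h u hu hmk v hv hedge h0
    rw [List.foldl_cons] at h
    rcases pvPassF_cases g n' st u0 with ⟨hnm, he⟩ | ⟨-, he⟩
    · rw [he] at h
      rcases List.mem_cons.mp hu with rfl | hul
      · exact hnm hmk
      · exact ih st h u hul hmk v hv hedge h0
    · rw [he] at h
      have hst2 : ((List.range n').foldl (pvInnerF g u0) st).2 = false := by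
        by_contra hne
        have hx : ((List.range n').foldl (pvInnerF g u0) st).2 = true :=
          by revert hne; cases ((List.range n').foldl (pvInnerF g _) st).2 <;> simp
        rw [pvPa_sticky g n' l _ hx] at h
        cases h
      have hid := pvIn_nochange g u0 (List.range n') st hst2
      rw [hid] at h
      rcases List.mem_cons.mp hu with rfl | hul
      · exact pvIn_closed g u (List.range n') st hst2 v hv hedge h0
      · exact ih st h u hul hmk v hv hedge h0

lemma pvPa_count_le (g : List (List Int)) (n' : Nat) (l : List Nat) :
    ∀ st : List Int × Bool, (l.foldl (pvPassF g n') st).1.count 0 ≤ st.1.count 0 := by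
  induction l with
  | nil => intro st; simp
  | cons u l ih =>
    intro st
    rw [List.foldl_cons]
    rcases pvPassF_cases g n' st u with ⟨-, he⟩ | ⟨-, he⟩
    · rw [he]; exact ih st
    · rw [he]; exact (ih _).trans (pvIn_count_le g u (List.range n') st)

lemma pvPa_count_lt (g : List (List Int)) (n' : Nat) (l : List Nat) :
    ∀ st : List Int × Bool, st.2 = false → (l.foldl (pvPassF g n') st).2 = true →
      (l.foldl (pvPassF g n') st).1.count 0 < st.1.count 0 := by
  induction l with
  | nil => intro st h1 h2; rw [List.foldl_nil] at h2; rw [h1] at h2; cases h2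
  | cons u l ih =>
    intro st h1 h2
    rw [List.foldl_cons] at h2 ⊢
    rcases pvPassF_cases g n' st u with ⟨-, he⟩ | ⟨-, he⟩
    · rw [he] at h2 ⊢; exact ih st h1 h2
    · rw [he] at h2 ⊢
      cases hf : ((List.range n').foldl (pvInnerF g u) st).2 with
      | true =>
        have hlt := pvIn_count_lt g u (List.range n') st h1 hf
        have hle := pvPa_count_le g n' l ((List.range n').foldl (pvInnerF g u) st)
        omega
      | false =>
        have hid := pvIn_nochange g u (List.range n') st hf
        rw [hid] at h2 ⊢
        exact ih st h1 h2

lemma pvSaturate_spec {g : List (List Int)} {N n' k : Nat}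
    (hn' : n' = N) (hgN : g.length = N) (hrows : ∀ r ∈ g, r.length = N) :
    ∀ (fuel : Nat) (visit : List Int), visit.length = N → pv01 visit →
      (∀ j, pvMk visit j → pvRch g k j) → visit.count 0 + 1 ≤ fuel →
      (pvSaturate g n' fuel visit).length = N ∧ pv01 (pvSaturate g n' fuel visit) ∧
      (∀ j, pvMk (pvSaturate g n' fuel visit) j → pvRch g k j) ∧
      (∀ j, pvMk visit j → pvMk (pvSaturate g n' fuel visit) j) ∧
      (∀ u v, pvMk (pvSaturate g n' fuel visit) u → pvEd g u v →
        pvMk (pvSaturate g n' fuel visit) v) := by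
  intro fuel
  induction fuel with
  | zero => intro visit _ _ _ hb; omega
  | succ fuel ih =>
    intro visit hlen h01 hsound hb
    rcases hps : pvPass g n' visit with ⟨v', ch⟩
    rw [pvPass_eq_fold] at hps
    have hv' : v' = ((List.range n').foldl (pvPassF g n') (visit, false)).1 := by
      rw [hps]
    have hch : ch = ((List.range n').foldl (pvPassF g n') (visit, false)).2 := by
      rw [hps]
    simp only [pvSaturate, pvPass_eq_fold, hps]
    cases ch with
    | false =>
      have hid := pvPa_nochange g n' (List.range n') (visit, false) hch.symm
      have hveq : v' = visit := by rw [hv', hid]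
      rw [if_neg (by simp), hveq]
      have hclosed : ∀ u v, pvMk visit u → pvEd g u v → pvMk visit v := by
        intro u v hmk hedge
        have huN : u < N := by
          have := pvMk_lt hmk
          omega
        have hvN : v < N := (pvEd_lt hrows hedge).2
        have hcl := pvPa_closed g n' (List.range n') (visit, false) hch.symm u
          (by simpa [hn'] using huN) hmk v (by simp [List.mem_range, hn']; omega) hedge
        rcases h01 v (by omega) with h0 | h1
        · exact absurd h0 hcl
        · exact h1
      exact ⟨hlen, h01, hsound, fun j h => h, hclosed⟩
    | true =>
      simp only [if_true]
      have hlen' : v'.length = N := by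
        rw [hv', pvPa_len]
        exact hlen
      have h01' : pv01 v' := by
        rw [hv']
        exact pvPa_01 g n' (List.range n') (visit, false) h01
      have hsound' : ∀ j, pvMk v' j → pvRch g k j := by
        rw [hv']
        exact pvPa_sound g n' k (List.range n') (visit, false) hsound
      have hcnt : v'.count 0 < visit.count 0 := by
        rw [hv']
        exact pvPa_count_lt g n' (List.range n') (visit, false) rfl hch.symm
      have hmono : ∀ j, pvMk visit j → pvMk v' j := by
        rw [hv']
        exact fun j h => pvPa_mono g n' (List.range n') (visit, false) j h
      obtain ⟨r1, r2, r3, r4, r5⟩ := ih v' hlen' h01' hsound' (by omega)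
      exact ⟨r1, r2, r3, fun j h => r4 j (hmono j h), r5⟩

lemma pvB_char {i : Int} {g : List (List Int)} {n : Int} (hpre : pvSquare i g n) :
    pvChar g i.toNat g.length (BFS_alt i g n) := by
  obtain ⟨hi0, hin, hglen, hrows'⟩ := hpre
  have hrows : ∀ r ∈ g, r.length = g.length := fun r hr => by
    have := hrows' r hr
    omega
  have hkN : i.toNat < g.length := by omega
  have hnN : n.toNat = g.length := by omega
  have hik : i = ((i.toNat : Nat) : Int) := by omega
  obtain ⟨row, hrow⟩ : ∃ row, g[i.toNat]? = some row := ⟨_, List.getElem?_eq_getElem hkN⟩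
  have hrowlen : row.length = g.length := hrows row (List.mem_of_getElem? hrow)
  have hgu : PySem.List.pyGet? g i = some row := by
    rw [hik, PySem.List.pyGet?_natCast]
    exact hrow
  unfold BFS_alt
  rw [hnN, hgu]
  simp only [Option.getD_some]
  have hsr := pvSeedRow_eq_N row (List.replicate g.length 0) 0
  rw [Nat.cast_zero] at hsr
  rw [hsr]
  have hsdlen : (pvSeedRowN (List.replicate g.length 0) 0 row).length = g.length := by
    rw [pvSeedRowN_len]
    simp
  have hsd01 : pv01 (pvSeedRowN (List.replicate g.length 0) 0 row) := by
    apply pvSeedRowN_01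
    intro j hj
    simp only [List.length_replicate] at hj
    left
    simp [List.getElem?_replicate, hj]
  have hrepl : ∀ j, ¬ pvMk (List.replicate g.length (0 : Int)) j := by
    intro j hj
    unfold pvMk at hj
    rw [List.getElem?_replicate] at hj
    split_ifs at hj <;> simp at hj
  have hsdsound : ∀ j, pvMk (pvSeedRowN (List.replicate g.length 0) 0 row) j →
      pvRch g i.toNat j := by
    intro j hj
    rcases pvSeedRowN_new row _ 0 j hj with hm | ⟨d, hd, hjd⟩
    · exact absurd hm (hrepl j)
    · rw [hjd]
      simpa using pvRch.base d ((pvEd_iff_row hrow).mpr hd)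
  obtain ⟨r1, r2, r3, r4, r5⟩ :=
    pvSaturate_spec (k := i.toNat) rfl rfl hrows (g.length + 1)
      (pvSeedRowN (List.replicate g.length 0) 0 row) hsdlen hsd01 hsdsound
      (by have := List.count_le_length (l := pvSeedRowN (List.replicate g.length 0) 0 row) (a := (0:Int)); omega)
  refine ⟨r1, fun j hj => ?_⟩
  have hcomp : ∀ j', pvRch g i.toNat j' →
      pvMk (pvSaturate g g.length (g.length + 1) (pvSeedRowN (List.replicate g.length 0) 0 row)) j' := by
    intro j' hr
    induction hr with
    | base v hv =>
      have hrv := (pvEd_iff_row hrow).mp hv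
      have hvN : v < g.length := by
        have := (List.getElem?_eq_some_iff.mp hrv).1
        omega
      have hseed : pvMk (pvSeedRowN (List.replicate g.length 0) 0 row) v := by
        simpa using pvSeedRowN_cover row _ 0 v hrv (by simp; omega)
      exact r4 v hseed
    | step u v hru hedge ihh => exact r5 u v ihh hedge
  rcases r2 j (by omega) with h0 | h1
  · refine Or.inr ⟨h0, fun hr => ?_⟩
    have := hcomp j hr
    unfold pvMk at this
    rw [this] at h0
    simp at h0
  · exact Or.inl ⟨h1, r3 j h1⟩

lemma pvChar_unique {g : List (List Int)} {k N : Nat} {a b : List Int}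
    (ha : pvChar g k N a) (hb : pvChar g k N b) : a = b := by
  apply List.ext_getElem?
  intro j
  by_cases hj : j < N
  · rcases ha.2 j hj with ⟨ha1, har⟩ | ⟨ha0, har⟩ <;>
      rcases hb.2 j hj with ⟨hb1, hbr⟩ | ⟨hb0, hbr⟩
    · rw [ha1, hb1]
    · exact absurd har hbr
    · exact absurd hbr har
    · rw [ha0, hb0]
  · rw [List.getElem?_eq_none (by rw [ha.1]; omega),
      List.getElem?_eq_none (by rw [hb.1]; omega)]

-- ---- the flat case: the start row marks nothing, both programs return [0]*n ----
lemma pvMarkRow_no1 (row : List Int) (h1 : (1 : Int) ∉ row) :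
    ∀ (visit q : List Int) (idx : Int), pvMarkRow visit q idx row = (visit, q) := by
  induction row with
  | nil => intro visit q idx; simp [pvMarkRow]
  | cons v row ih =>
    intro visit q idx
    simp only [pvMarkRow]
    rw [if_neg (by
      rintro ⟨-, rfl⟩
      exact h1 (List.mem_cons_self ..))]
    exact ih (fun hm => h1 (List.mem_cons_of_mem _ hm)) visit q (idx + 1)

lemma pvBfsLoop_nilq (g : List (List Int)) : ∀ (fuel : Nat) (visit : List Int),
    pvBfsLoop g fuel visit [] = visit := by
  intro fuel visit
  cases fuel <;> simp [pvBfsLoop]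

lemma pvA_flat {i : Int} {g : List (List Int)} {n : Int} (hpre : pvFlat i g n) :
    BFS i g n = List.replicate n.toNat 0 := by
  obtain ⟨hsome, -, h1⟩ := hpre
  obtain ⟨row, hrow⟩ := Option.isSome_iff_exists.mp hsome
  rw [hrow] at h1
  unfold BFS
  simp only [pvBfsLoop, hrow, Option.getD_some]
  rw [pvMarkRow_no1 row (by simpa using h1)]
  exact pvBfsLoop_nilq g _ _

lemma pvSeedRow_no1 (row : List Int) (h1 : (1 : Int) ∉ row) :
    ∀ (visit : List Int) (idx : Int), pvSeedRow visit idx row = visit := by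
  induction row with
  | nil => intro visit idx; simp [pvSeedRow]
  | cons x row ih =>
    intro visit idx
    simp only [pvSeedRow]
    rw [if_neg (by
      rintro rfl
      exact h1 (List.mem_cons_self ..))]
    exact ih (fun hm => h1 (List.mem_cons_of_mem _ hm)) visit (idx + 1)

lemma pvPass_unmarked (g : List (List Int)) (n' : Nat) (l : List Nat) :
    ∀ st : List Int × Bool, (∀ u : Nat, st.1[u]? ≠ some 1) →
      l.foldl (pvPassF g n') st = st := by
  induction l with
  | nil => intro st _; simp
  | cons u l ih =>
    intro st h
    rw [List.foldl_cons]
    rcases pvPassF_cases g n' st u with ⟨-, he⟩ | ⟨hm, he⟩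
    · rw [he]; exact ih st h
    · exact absurd hm (h u)

lemma pvB_flat {i : Int} {g : List (List Int)} {n : Int} (hpre : pvFlat i g n) :
    BFS_alt i g n = List.replicate n.toNat 0 := by
  obtain ⟨hsome, -, h1⟩ := hpre
  obtain ⟨row, hrow⟩ := Option.isSome_iff_exists.mp hsome
  rw [hrow] at h1
  unfold BFS_alt
  simp only [hrow, Option.getD_some]
  rw [pvSeedRow_no1 row (by simpa using h1)]
  simp only [pvSaturate, pvPass_eq_fold]
  rw [pvPass_unmarked g n.toNat (List.range n.toNat) (List.replicate n.toNat 0, false) (by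
    intro u hu
    rw [List.getElem?_replicate] at hu
    split_ifs at hu <;> simp at hu)]
  rfl

-- ===== VERDICT (by name: the statement is the Claim_ definition above) =====
theorem BFS_spec : Claim_equal_BFS := by
  intro i g n _hdom hpre
  unfold Spec_BFS
  rcases hpre with hsq | hflat
  · exact pvChar_unique (pvA_char hsq) (pvB_char hsq)
  · rw [pvA_flat hflat, pvB_flat hflat]
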